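-- pv_equiv track=rewrite | github.com/JoelCooperPhD/RPi_Logger | rpi_logger/modules/Cameras/discovery/backends/macos.py | _create_stable_id
-- ===== SOURCE A (Python) =====
-- from typing import Optional
--
-- def _create_stable_id(
--     friendly_name: str, vid_pid: Optional[str], index: int
-- ) -> str:
--     """Create a human-readable stable ID for folder naming.
--
--     Creates IDs like:
--     - "facetime_hd_camera" (built-in camera)
--     - "logitech_c920_046d_0825" (USB webcam with VID:PID)
--     - "usb_camera_0" (fallback)
--
--     Args:
--         friendly_name: Camera name from AVFoundation
--         vid_pid: VID:PID string if available (e.g., "046d:0825")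
--         index: Camera index as fallback
--
--     Returns:
--         Sanitized string suitable for directory names.
--     """
--     # Sanitize the friendly name
--     safe_name = friendly_name.lower()
--     # Replace special characters with underscores
--     for char in " -():,./'\"":
--         safe_name = safe_name.replace(char, "_")
--     # Remove consecutive underscores
--     while "__" in safe_name:
--         safe_name = safe_name.replace("__", "_")
--     safe_name = safe_name.strip("_")
--
--     # Append VID:PID if available (for USB cameras)
--     if vid_pid:
--         safe_vid_pid = vid_pid.replace(":", "_")
--         return f"{safe_name}_{safe_vid_pid}"
--
--     # For built-in cameras without VID:PID, just use the name
--     if safe_name: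
--         return safe_name
--
--     # Fallback
--     return f"camera_{index}"
-- ===== SOURCE B (Python) =====
-- from typing import Optional
--
-- def _create_stable_id(
--     friendly_name: str, vid_pid: Optional[str], index: int
-- ) -> str:
--     """Create a human-readable stable ID for folder naming (single-pass sanitizer)."""
--     parts = []
--     for ch in friendly_name.lower():
--         if ch in " -():,./'\"_":
--             # separator: emit one '_' per run, never at the start
--             if parts and parts[-1] != "_":
--                 parts.append("_")
--         else:
--             parts.append(ch)
--     safe_name = "".join(parts).strip("_")
--
--     if vid_pid:
--         return f"{safe_name}_{vid_pid.replace(':', '_')}"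
--     if safe_name:
--         return safe_name
--     return f"camera_{index}"
-- ===== Notes on version B (the rewrite author's own statement) =====
-- stated objective: alternative
-- what changed: Replaces A's ten whole-string replace() passes plus the repeated '__'-collapsing while-loop with a single accumulating pass over the lowered name that emits at most one '_' per separator run.
import Mathlib
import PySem

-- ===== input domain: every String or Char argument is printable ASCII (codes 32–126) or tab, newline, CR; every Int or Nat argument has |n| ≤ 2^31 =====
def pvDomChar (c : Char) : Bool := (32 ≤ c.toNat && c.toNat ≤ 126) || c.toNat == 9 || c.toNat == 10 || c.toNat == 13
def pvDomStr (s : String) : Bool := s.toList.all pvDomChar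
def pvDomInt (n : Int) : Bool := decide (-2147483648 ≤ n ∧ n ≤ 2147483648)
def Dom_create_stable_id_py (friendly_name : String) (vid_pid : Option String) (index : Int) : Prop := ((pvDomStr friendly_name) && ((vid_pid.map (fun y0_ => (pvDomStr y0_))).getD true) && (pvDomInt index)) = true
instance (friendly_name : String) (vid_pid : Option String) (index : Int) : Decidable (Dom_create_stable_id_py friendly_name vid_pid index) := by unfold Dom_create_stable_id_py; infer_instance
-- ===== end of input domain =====

-- B sanitizes the camera name in ONE accumulating pass over the lowered string
-- (at most one '_' emitted per separator run) instead of A's ten replace() passes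
-- plus a while-loop repeatedly collapsing "__"; same return value on all inputs.


-- ===== PORT A =====
-- proof-side model of one `replace s "__" "_"` pass, used only to justify
-- termination of the `while "__" in safe_name` loop below
def pvRep : List Char → List Char
  | [] => []
  | '_' :: '_' :: t => '_' :: pvRep t
  | c :: t => c :: pvRep t

theorem pvRep_cons (c : Char) (t : List Char) (h : ¬ (c = '_' ∧ t.head? = some '_')) :
    pvRep (c :: t) = c :: pvRep t := by
  rw [pvRep.eq_def]
  split
  · simp at *
  · simp_all
  · rename_i x heq; injection heq with h1 h2; subst h1; subst h2; rfl

theorem pvHne (c : Char) (t : List Char)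
    (hne : ∀ (t0 : List Char), c = '_' → t = '_' :: t0 → False) :
    ¬ (c = '_' ∧ t.head? = some '_') := by
  rintro ⟨rfl, hh⟩
  cases t with
  | nil => simp at hh
  | cons b t' => simp at hh; exact hne t' rfl (by rw [hh])

theorem pvRep_spec : ∀ (l acc : List Char) (fuel : Nat), l.length ≤ fuel →
    PySem.Chars.replace.go ['_', '_'] ['_'] fuel l acc = acc.reverse ++ pvRep l := by
  intro l
  induction l using pvRep.induct with
  | case1 => intro acc fuel _; cases fuel <;> simp [PySem.Chars.replace.go, pvRep]
  | case2 t ih =>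
    intro acc fuel h
    match fuel with
    | fuel + 1 =>
      simp only [PySem.Chars.replace.go, List.length_cons] at *
      rw [show List.isPrefixOf ['_','_'] ('_'::'_'::t) = true by simp [List.isPrefixOf]]
      rw [if_pos rfl]
      rw [show List.drop ([].length + 1 + 1) ('_'::'_'::t) = t by simp]
      rw [ih (['_'].reverse ++ acc) fuel (by omega)]
      simp [pvRep]
  | case3 c t hne ih =>
    intro acc fuel h
    have hnc : ¬ (c = '_' ∧ t.head? = some '_') := pvHne c t hne
    match fuel with
    | fuel + 1 =>
      simp only [PySem.Chars.replace.go]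
      have hpre : List.isPrefixOf ['_','_'] (c::t) = false := by
        cases t with
        | nil => simp [List.isPrefixOf]
        | cons b t' =>
          by_cases hc : c = '_'
          · by_cases hb : b = '_'
            · exact absurd ⟨hc, by simp [hb]⟩ hnc
            · simp only [List.isPrefixOf]; simp [hc, show ¬ ('_' = b) from fun he => hb he.symm]
          · simp [List.isPrefixOf, show ¬ ('_' = c) from fun he => hc he.symm]
      rw [hpre]
      simp only [Bool.false_eq_true, if_false]
      rw [ih (c :: acc) fuel (by simp at h; omega)]
      rw [pvRep_cons c t hnc]
      simp

theorem pvReplace_uu_eq (s : List Char) :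
    PySem.Chars.replace s ['_', '_'] ['_'] = pvRep s := by
  simpa [PySem.Chars.replace] using pvRep_spec s [] s.length le_rfl

theorem pvRep_length_le (l : List Char) : (pvRep l).length ≤ l.length := by
  induction l using pvRep.induct with
  | case1 => simp [pvRep]
  | case2 t ih => simp only [pvRep, List.length_cons]; omega
  | case3 c t hne ih =>
    rw [pvRep_cons c t (pvHne c t hne)]; simp only [List.length_cons]; omega

theorem pvRep_length_lt (l : List Char) (h : ['_', '_'] <:+: l) :
    (pvRep l).length < l.length := by
  induction l using pvRep.induct with
  | case1 => simp at h
  | case2 t ih =>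
    have := pvRep_length_le t
    simp only [pvRep, List.length_cons]; omega
  | case3 c t hne ih =>
    have hnc : ¬ (c = '_' ∧ t.head? = some '_') := pvHne c t hne
    rw [pvRep_cons c t hnc]
    simp only [List.length_cons]
    have ht : ['_', '_'] <:+: t := by
      rcases (List.infix_cons_iff.mp h) with hp | hi
      · exfalso
        rcases hp with ⟨r, hr⟩
        cases t with
        | nil => simp at hr
        | cons b t' =>
          injection hr with e1 e2
          injection e2 with e3 e4
          exact hnc ⟨e1.symm, by simp [e3.symm]⟩
      · exact hi
    exact Nat.succ_lt_succ (ih ht)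

theorem pvReplace_uu_len_lt (s : List Char) (h : PySem.Chars.isIn ['_', '_'] s = true) :
    (PySem.Chars.replace s ['_', '_'] ['_']).length < s.length := by
  rw [pvReplace_uu_eq]
  exact pvRep_length_lt s ((PySem.Chars.isIn_iff_infix _ _).mp h)

-- the `while "__" in safe_name: safe_name = safe_name.replace("__", "_")` loop of A
def pvCollapseA (s : List Char) : List Char :=
  if hin : PySem.Chars.isIn ['_', '_'] s = true then
    pvCollapseA (PySem.Chars.replace s ['_', '_'] ['_'])
  else s
termination_by s.length
decreasing_by exact pvReplace_uu_len_lt _ hin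

-- A's sanitize phase: lower, ten replace passes, collapse loop, strip('_')
def pvSafeA (friendly_name : String) : List Char :=
  PySem.Chars.stripChars
    (pvCollapseA
      ((" -():,./'\"".toList).foldl (fun s c => PySem.Chars.replace s [c] ['_'])
        (PySem.Chars.lower friendly_name.toList))) ['_']

def create_stable_id_py (friendly_name : String) (vid_pid : Option String) (index : Int) : String :=
  let safe := pvSafeA friendly_name
  match vid_pid with
  | some v =>
    if v.toList ≠ [] then String.ofList (safe ++ '_' :: PySem.Chars.replace v.toList [':'] ['_'])
    else if safe ≠ [] then String.ofList safe
    else String.ofList ("camera_".toList ++ PySem.Int.toChars index)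
  | none =>
    if safe ≠ [] then String.ofList safe
    else String.ofList ("camera_".toList ++ PySem.Int.toChars index)

-- ===== PORT B =====
def pvSep : List Char := " -():,./'\"_".toList

-- B's sanitize phase: one pass over the lowered name, then strip('_')
def pvSafeB (friendly_name : String) : List Char :=
  PySem.Chars.stripChars
    ((PySem.Chars.lower friendly_name.toList).foldl
      (fun acc c =>
        if pvSep.contains c then
          (if acc ≠ [] ∧ acc.getLast? ≠ some '_' then acc ++ ['_'] else acc)
        else acc ++ [c]) []) ['_']

def create_stable_id_py_alt (friendly_name : String) (vid_pid : Option String) (index : Int) : String :=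
  let safe := pvSafeB friendly_name
  match vid_pid with
  | some v =>
    if v.toList ≠ [] then String.ofList (safe ++ '_' :: PySem.Chars.replace v.toList [':'] ['_'])
    else if safe ≠ [] then String.ofList safe
    else String.ofList ("camera_".toList ++ PySem.Int.toChars index)
  | none =>
    if safe ≠ [] then String.ofList safe
    else String.ofList ("camera_".toList ++ PySem.Int.toChars index)

-- ===== PRECONDITION & SPEC =====
def Spec_create_stable_id_py (friendly_name : String) (vid_pid : Option String) (index : Int) (out : String) : Prop := out = create_stable_id_py_alt friendly_name vid_pid index
instance (friendly_name : String) (vid_pid : Option String) (index : Int) (out : String) : Decidable (Spec_create_stable_id_py friendly_name vid_pid index out) := by unfold Spec_create_stable_id_py; infer_instance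

-- ===== CLAIM (what is proved, stated in full; the proofs are below) =====
def Claim_equal_create_stable_id_py : Prop := ∀ (friendly_name : String) (vid_pid : Option String) (index : Int), Dom_create_stable_id_py friendly_name vid_pid index → Spec_create_stable_id_py friendly_name vid_pid index (create_stable_id_py friendly_name vid_pid index)

-- ===== LEMMAS AND PROOFS =====

-- the pointwise sanitizer both programs implement: any separator becomes '_'
def pvM (e : Char) : Char := if pvSep.contains e then '_' else e
def pvR (c x : Char) : Char := if x = c then '_' else x

theorem pvChain (x : Char) :
    pvR '"' (pvR '\'' (pvR '/' (pvR '.' (pvR ',' (pvR ':' (pvR ')' (pvR '(' (pvR '-' (pvR ' ' x))))))))) = pvM x := by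
  by_cases hmem : x ∈ ([' ', '-', '(', ')', ':', ',', '.', '/', '\'', '"', '_'] : List Char)
  · simp only [List.mem_cons, List.not_mem_nil, or_false] at hmem
    rcases hmem with rfl|rfl|rfl|rfl|rfl|rfl|rfl|rfl|rfl|rfl|rfl <;> decide
  · simp only [List.mem_cons, List.not_mem_nil, or_false, not_or] at hmem
    obtain ⟨n1,n2,n3,n4,n5,n6,n7,n8,n9,n10,n11⟩ := hmem
    have hm : ¬ x ∈ pvSep := by
      rw [pvSep, show " -():,./'\"_".toList = [' ', '-', '(', ')', ':', ',', '.', '/', '\'', '"', '_'] from by decide]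
      simp [n1,n2,n3,n4,n5,n6,n7,n8,n9,n10,n11]
    simp [pvR, pvM, hm, n1,n2,n3,n4,n5,n6,n7,n8,n9,n10]

theorem pvReplace_single_go (c : Char) : ∀ (l acc : List Char) (fuel : Nat), l.length ≤ fuel →
    PySem.Chars.replace.go [c] ['_'] fuel l acc =
      acc.reverse ++ l.map (fun x => if x = c then '_' else x) := by
  intro l
  induction l with
  | nil => intro acc fuel _; cases fuel <;> simp [PySem.Chars.replace.go]
  | cons x t ih =>
    intro acc fuel h
    match fuel with
    | fuel + 1 =>
      simp only [PySem.Chars.replace.go]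
      by_cases hx : c = x
      · rw [show List.isPrefixOf [c] (x::t) = true by simp [List.isPrefixOf, hx]]
        rw [if_pos rfl]
        rw [show List.drop ([c] : List Char).length (x::t) = t from by simp]
        rw [ih (['_'].reverse ++ acc) fuel (by simp at h; omega)]
        simp [hx.symm]
      · rw [show List.isPrefixOf [c] (x::t) = false by simp [List.isPrefixOf, hx]]
        simp only [Bool.false_eq_true, if_false]
        rw [ih (x :: acc) fuel (by simp at h; omega)]
        simp [show ¬ (x = c) from fun he => hx he.symm]

theorem pvReplace_single (s : List Char) (c : Char) :
    PySem.Chars.replace s [c] ['_'] = s.map (pvR c) := by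
  simpa [PySem.Chars.replace, pvR] using pvReplace_single_go c s [] s.length le_rfl

theorem pvFold_map_gen (cs : List Char) : ∀ (L : List Char),
    cs.foldl (fun s c => PySem.Chars.replace s [c] ['_']) L
      = L.map (fun x => cs.foldl (fun y c => pvR c y) x) := by
  induction cs with
  | nil => intro L; simp
  | cons c cs ih =>
    intro L
    rw [List.foldl_cons, ih (PySem.Chars.replace L [c] ['_']), pvReplace_single, List.map_map]
    rfl

-- A's ten replace passes compose into one pointwise map
theorem pvFold_replaces (L : List Char) :
    (" -():,./'\"".toList).foldl (fun s c => PySem.Chars.replace s [c] ['_']) L = L.map pvM := by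
  rw [pvFold_map_gen]
  apply List.map_congr_left
  intro x _
  rw [show " -():,./'\"".toList = [' ', '-', '(', ')', ':', ',', '.', '/', '\'', '"'] from by decide]
  simp only [List.foldl_cons, List.foldl_nil]
  exact pvChain x

-- collapsing runs of '_' to a single '_'
def pvSqueeze : List Char → List Char
  | [] => []
  | [c] => [c]
  | a :: b :: t => if a = '_' ∧ b = '_' then pvSqueeze (b :: t) else a :: pvSqueeze (b :: t)

theorem pvSqueeze_cons (a : Char) (x : List Char) :
    pvSqueeze (a :: x) =
      if a = '_' ∧ x.head? = some '_' then pvSqueeze x else a :: pvSqueeze x := by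
  cases x with
  | nil => simp [pvSqueeze]
  | cons b t => simp [pvSqueeze]

theorem pvRep_head? (l : List Char) : (pvRep l).head? = l.head? := by
  induction l using pvRep.induct with
  | case1 => rfl
  | case2 t ih => rfl
  | case3 c t hne ih => rw [pvRep_cons c t (pvHne c t hne)]; rfl

-- one "__" -> "_" pass does not change the collapsed form
theorem pvSqueeze_pvRep (l : List Char) : pvSqueeze (pvRep l) = pvSqueeze l := by
  induction l using pvRep.induct with
  | case1 => rfl
  | case2 t ih =>
    show pvSqueeze ('_' :: pvRep t) = pvSqueeze ('_'::'_'::t)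
    rw [pvSqueeze_cons '_' (pvRep t), pvRep_head? t, ih,
        show pvSqueeze ('_'::'_'::t) = pvSqueeze ('_'::t) by simp [pvSqueeze],
        pvSqueeze_cons '_' t]
  | case3 c t hne ih =>
    rw [pvRep_cons c t (pvHne c t hne), pvSqueeze_cons c (pvRep t), pvRep_head? t, ih,
        pvSqueeze_cons c t]

theorem pvSqueeze_of_no_uu (l : List Char) (h : ¬ (['_','_'] <:+: l)) : pvSqueeze l = l := by
  induction l using pvSqueeze.induct with
  | case1 => rfl
  | case2 c => rfl
  | case3 a b t hab ih =>
    exact absurd (⟨[], t, by simp [hab.1, hab.2]⟩ : ['_','_'] <:+: a::b::t) h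
  | case4 a b t hab ih =>
    rw [pvSqueeze, if_neg hab, ih (fun hi => h (hi.trans (List.suffix_cons a (b::t)).isInfix))]

-- A's while-loop computes exactly the collapsed form
theorem pvCollapseA_eq (l : List Char) : pvCollapseA l = pvSqueeze l := by
  induction l using pvCollapseA.induct with
  | case1 l h ih =>
    rw [pvCollapseA, dif_pos h, ih, pvReplace_uu_eq, pvSqueeze_pvRep]
  | case2 l h =>
    rw [pvCollapseA, dif_neg h]
    exact (pvSqueeze_of_no_uu l (fun hi => h ((PySem.Chars.isIn_iff_infix _ _).mpr hi))).symm

-- B's accumulator, modelled by the state "last emitted char" (none = nothing yet)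
def pvEmit : Option Bool → List Char → List Char
  | _, [] => []
  | st, e :: t =>
    if e = '_' then
      match st with
      | some false => '_' :: pvEmit (some true) t
      | _ => pvEmit st t
    else e :: pvEmit (some false) t

theorem pvEmit_none (es : List Char) : pvEmit none es = pvEmit (some true) es := by
  induction es with
  | nil => rfl
  | cons e t ih =>
    by_cases he : e = '_' <;> simp [pvEmit, he, ih]

theorem pvEmit_cons_ne (st : Option Bool) (e : Char) (t : List Char) (he : ¬ e = '_') :
    pvEmit st (e :: t) = e :: pvEmit (some false) t := by
  simp only [pvEmit]
  rw [if_neg he]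

theorem pvSqueeze_underscore (t : List Char) :
    pvSqueeze ('_' :: t) = '_' :: List.dropWhile (fun c => c == '_') (pvSqueeze t) := by
  induction t with
  | nil => simp [pvSqueeze]
  | cons b t' ih =>
    by_cases hb : b = '_'
    · subst hb
      rw [show pvSqueeze ('_'::'_'::t') = pvSqueeze ('_'::t') by simp [pvSqueeze], ih]
      simp [List.dropWhile, List.dropWhile_idempotent]
    · rw [pvSqueeze_cons '_' (b::t')]
      simp only [List.head?_cons]
      rw [if_neg (by simp [hb]), pvSqueeze_cons b t', if_neg (by simp [hb])]
      simp [hb]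

theorem pvEmit_false_true (es : List Char) :
    pvEmit (some false) es = pvSqueeze es ∧
      pvEmit (some true) es = List.dropWhile (fun c => c == '_') (pvSqueeze es) := by
  induction es with
  | nil => simp [pvEmit, pvSqueeze]
  | cons e t ih =>
    obtain ⟨ih1, ih2⟩ := ih
    by_cases he : e = '_'
    · subst he
      constructor
      · rw [show pvEmit (some false) ('_'::t) = '_' :: pvEmit (some true) t from rfl, ih2,
            pvSqueeze_underscore]
      · rw [show pvEmit (some true) ('_'::t) = pvEmit (some true) t from rfl, ih2,
            pvSqueeze_underscore]
        simp [List.dropWhile, List.dropWhile_idempotent]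
    · constructor
      · rw [show pvEmit (some false) (e::t) = e :: pvEmit (some false) t by simp [pvEmit, he], ih1,
            pvSqueeze_cons e t, if_neg (by simp [he])]
      · rw [show pvEmit (some true) (e::t) = e :: pvEmit (some false) t by simp [pvEmit, he], ih1,
            pvSqueeze_cons e t, if_neg (by simp [he])]
        simp [he]

theorem pvSep_underscore : pvSep.contains '_' = true := by decide

-- B's loop, related to pvEmit over the mapped characters
theorem pvFold_emit : ∀ (L acc : List Char),
    L.foldl (fun acc c =>
        if pvSep.contains c then
          (if acc ≠ [] ∧ acc.getLast? ≠ some '_' then acc ++ ['_'] else acc)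
        else acc ++ [c]) acc
      = acc ++ pvEmit (acc.getLast?.map (fun d => d == '_')) (L.map pvM) := by
  intro L
  induction L with
  | nil => intro acc; simp [pvEmit]
  | cons c t ih =>
    intro acc
    rw [List.foldl_cons, List.map_cons]
    by_cases hc : pvSep.contains c = true
    · have hmc : pvM c = '_' := by unfold pvM; rw [if_pos hc]
      rw [hmc, if_pos hc]
      cases hlast : acc.getLast? with
      | none =>
        have hacc : acc = [] := List.getLast?_eq_none_iff.mp hlast
        subst hacc
        rw [if_neg (by simp)]
        rw [ih []]
        simp [pvEmit]
      | some d =>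
        have hacc : acc ≠ [] := by intro h; rw [h] at hlast; simp at hlast
        by_cases hd : d = '_'
        · subst hd
          rw [if_neg (fun hx => hx.2 rfl)]
          rw [ih acc, hlast]
          simp [pvEmit]
        · rw [if_pos ⟨hacc, fun he => hd (Option.some.inj (hlast ▸ he))⟩]
          rw [ih (acc ++ ['_'])]
          rw [show (acc ++ ['_']).getLast? = some '_' from List.getLast?_concat]
          simp only [Option.map_some]
          have hdb : (d == '_') = false := by simp [hd]
          rw [hdb]
          rw [show pvEmit (some false) ('_' :: List.map pvM t) = '_' :: pvEmit (some true) (List.map pvM t) from rfl]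
          simp only [List.append_assoc, List.cons_append, List.nil_append, beq_self_eq_true]
    · have hmc : pvM c = c := by unfold pvM; rw [if_neg hc]
      have hcu : c ≠ '_' := by
        intro h; rw [h] at hc; exact hc pvSep_underscore
      rw [hmc, if_neg hc]
      rw [ih (acc ++ [c])]
      rw [show (acc ++ [c]).getLast? = some c from List.getLast?_concat]
      simp only [Option.map_some]
      have hcb : (c == '_') = false := by simp [hcu]
      rw [hcb, pvEmit_cons_ne _ c _ hcu]
      simp only [List.append_assoc, List.cons_append, List.nil_append]

-- strip('_') absorbs a left dropWhile of underscores
theorem pvStrip_drop (x : List Char) :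
    PySem.Chars.stripChars (List.dropWhile (fun c => c == '_') x) ['_'] =
      PySem.Chars.stripChars x ['_'] := by
  simp only [PySem.Chars.stripChars]
  have hp : (fun c => List.contains ['_'] c) = (fun c => c == '_') := by
    funext c
    by_cases hcu : c = '_'
    · subst hcu; decide
    · simp only [List.contains_cons, List.contains_nil, Bool.or_false]
  rw [hp, List.dropWhile_idempotent]

-- both sanitize phases produce the same stripped name
theorem pvCore (friendly_name : String) : pvSafeA friendly_name = pvSafeB friendly_name := by
  unfold pvSafeA pvSafeB
  rw [pvFold_replaces, pvCollapseA_eq, pvFold_emit (PySem.Chars.lower friendly_name.toList) []]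
  simp only [List.getLast?_nil, Option.map_none, List.nil_append]
  rw [pvEmit_none, (pvEmit_false_true (List.map pvM (PySem.Chars.lower friendly_name.toList))).2, pvStrip_drop]

-- ===== VERDICT (by name: the statement is the Claim_ definition above) =====
theorem create_stable_id_py_spec : Claim_equal_create_stable_id_py := by
  intro friendly_name vid_pid index _
  unfold Spec_create_stable_id_py create_stable_id_py create_stable_id_py_alt
  rw [pvCore friendly_name]
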